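-- pv_equiv track=rewrite | github.com/anonymous29008/MoST | Multimodal-Foundation-Model-with-MoE/MoST_dataset/dialogue_and_tts/interrupted_dialogue_for_TTS.py | format_back_dialogue
-- ===== SOURCE A (Python) =====
-- from typing import List, Dict, Tuple
--
-- def format_back_dialogue(dialogue: str) -> List[Dict]:
--     """Format back dialogue into a list of dictionaries with clear speaker labels."""
--     formatted = []
--
--     # Find the first occurrence of either "Assistant:" or "User:"
--     dialogue_lines = dialogue.split('\n')
--     start_idx = 0
--     for idx, line in enumerate(dialogue_lines):
--         if line.strip().startswith(("Assistant:", "User:")):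
--             start_idx = idx
--             break
--
--     # Remove any text before the actual dialogue starts
--     dialogue_lines = dialogue_lines[start_idx:]
--
--     # Rest of the dialogue processing
--     turns = []
--     current_turn = ""
--     for line in dialogue_lines:
--         if line.startswith("Assistant:") or line.startswith("User:"):
--             if current_turn:
--                 turns.append(current_turn.strip())
--             current_turn = line
--         else:
--             current_turn += " " + line.strip()
--     if current_turn:
--         turns.append(current_turn.strip())
--
--     # Convert turns into dictionaries
--     for turn in turns:
--         if turn.startswith("User:"):
--             role = "user"
--             content = turn[len("User:"):].strip()
--         else:  # Assistant turn
--             role = "assistant"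
--             content = turn[len("Assistant:"):].strip()
--         formatted.append({"role": role, "content": content})
--
--     return formatted
-- ===== SOURCE B (Python) =====
-- def format_back_dialogue(dialogue: str) -> list:
--     """Index-based grouping: find turn boundaries and build each dict in one pass."""
--     lines = dialogue.split('\n')
--     start = 0
--     for i, l in enumerate(lines):
--         if l.strip().startswith(("Assistant:", "User:")):
--             start = i
--             break
--     lines = lines[start:]
--
--     def is_hdr(l):
--         return l.startswith(("Assistant:", "User:"))
--
--     out = []
--     i = 0
--     n = len(lines)
--     while i < n:
--         j = i + 1
--         while j < n and not is_hdr(lines[j]):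
--             j += 1
--         first = lines[i] if is_hdr(lines[i]) else lines[i].strip()
--         turn = " ".join([first] + [lines[k].strip() for k in range(i + 1, j)]).strip()
--         if turn.startswith("User:"):
--             out.append({"role": "user", "content": turn[len("User:"):].strip()})
--         else:
--             out.append({"role": "assistant", "content": turn[len("Assistant:"):].strip()})
--         i = j
--     return out
-- ===== Notes on version B (the rewrite author's own statement) =====
-- stated objective: alternative
-- what changed: A threads a running current_turn string accumulator through one loop; B instead spans each turn's block of lines up to the next header line (boundary grouping), joins the group's stripped continuation lines with single spaces via str.join, and emits each role/content dict directly in one pass.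
import Mathlib
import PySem

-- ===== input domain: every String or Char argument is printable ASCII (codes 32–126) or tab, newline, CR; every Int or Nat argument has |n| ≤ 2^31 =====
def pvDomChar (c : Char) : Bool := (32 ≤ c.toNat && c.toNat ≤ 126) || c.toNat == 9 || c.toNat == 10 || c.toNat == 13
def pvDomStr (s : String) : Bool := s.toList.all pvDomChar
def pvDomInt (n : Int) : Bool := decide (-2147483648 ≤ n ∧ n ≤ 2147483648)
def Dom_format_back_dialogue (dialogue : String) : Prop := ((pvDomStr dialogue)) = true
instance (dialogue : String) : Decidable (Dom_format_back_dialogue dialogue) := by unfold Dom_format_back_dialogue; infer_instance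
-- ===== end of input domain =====

-- B replaces A's running string accumulator by boundary-based grouping (span to the
-- next header, join the group); same cost, different decomposition ("alternative").

-- ===== PORT A =====
-- shared literal sub-expressions of both Pythons: the two header tests and the
-- turn -> {"role","content"} conversion (identical code in Source A and Source B)
def fbIsHdrStrip (l : List Char) : Bool :=
  PySem.Chars.startswith (PySem.Chars.strip l) "Assistant:".toList ||
  PySem.Chars.startswith (PySem.Chars.strip l) "User:".toList

def fbIsHdr (l : List Char) : Bool :=
  PySem.Chars.startswith l "Assistant:".toList ||
  PySem.Chars.startswith l "User:".toList

def fbToDict (turn : List Char) : List (String × String) :=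
  if PySem.Chars.startswith turn "User:".toList then
    [("role", "user"),
     ("content", String.ofList (PySem.Chars.strip (PySem.List.slice turn (some 5) none)))]
  else
    [("role", "assistant"),
     ("content", String.ofList (PySem.Chars.strip (PySem.List.slice turn (some 10) none)))]

-- the 'for idx, line in enumerate(...): if ...: start_idx = idx; break' search (same loop in both Pythons)
def fbFindStart : List (List Char) → Nat → Nat
  | [], _ => 0
  | l :: ls, i => if fbIsHdrStrip l then i else fbFindStart ls (i + 1)

-- A's accumulator loop over the lines: (current_turn, turns)
def fbLoopA : List (List Char) → List Char → List (List Char) → List (List Char)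
  | [], cur, turns => if cur = [] then turns else turns ++ [PySem.Chars.strip cur]
  | l :: ls, cur, turns =>
    if fbIsHdr l then
      fbLoopA ls l (if cur = [] then turns else turns ++ [PySem.Chars.strip cur])
    else
      fbLoopA ls (cur ++ ' ' :: PySem.Chars.strip l) turns

def format_back_dialogue (dialogue : String) : List (List (String × String)) :=
  let lines0 := (PySem.Chars.split? dialogue.toList ['\n']).getD []
  let lines := PySem.List.slice lines0 (some ((fbFindStart lines0 0 : Nat) : Int)) none
  (fbLoopA lines [] []).map fbToDict

-- ===== PORT B =====
-- one turn from its header/first line and its continuation lines: " ".join + strip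
def fbTurnB (l : List Char) (cont : List (List Char)) : List Char :=
  PySem.Chars.strip (PySem.Chars.join [' ']
    ((if fbIsHdr l then l else PySem.Chars.strip l) :: cont.map PySem.Chars.strip))

-- Source B's outer while loop: each step spans to the next header line (the inner while)
-- and emits that group's dict directly
def fbGroupsB : List (List Char) → List (List (String × String))
  | [] => []
  | l :: ls =>
    fbToDict (fbTurnB l (ls.takeWhile (fun x => !fbIsHdr x))) ::
      fbGroupsB (ls.dropWhile (fun x => !fbIsHdr x))
termination_by ls => ls.length
decreasing_by
  exact Nat.lt_succ_of_le (ls.length_dropWhile_le _)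

def format_back_dialogue_alt (dialogue : String) : List (List (String × String)) :=
  let lines0 := (PySem.Chars.split? dialogue.toList ['\n']).getD []
  let lines := PySem.List.slice lines0 (some ((fbFindStart lines0 0 : Nat) : Int)) none
  fbGroupsB lines

-- ===== PRECONDITION & SPEC =====
def Spec_format_back_dialogue (dialogue : String) (out : List (List (String × String))) : Prop := out = format_back_dialogue_alt dialogue
instance (dialogue : String) (out : List (List (String × String))) : Decidable (Spec_format_back_dialogue dialogue out) := by unfold Spec_format_back_dialogue; infer_instance

-- ===== CLAIM (what is proved, stated in full; the proofs are below) =====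
def Claim_equal_format_back_dialogue : Prop := ∀ (dialogue : String), Dom_format_back_dialogue dialogue → Spec_format_back_dialogue dialogue (format_back_dialogue dialogue)

-- ===== LEMMAS AND PROOFS =====

theorem fbGroupsB_nil : fbGroupsB [] = [] := by rw [fbGroupsB]

theorem fbGroupsB_cons (l : List Char) (ls : List (List Char)) :
    fbGroupsB (l :: ls) =
      fbToDict (fbTurnB l (ls.takeWhile (fun x => !fbIsHdr x))) ::
        fbGroupsB (ls.dropWhile (fun x => !fbIsHdr x)) := by
  rw [fbGroupsB]

-- the continuation extension A's else-branch accumulates over a group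
def fbExt (cont : List (List Char)) : List Char :=
  cont.flatMap (fun c => ' ' :: PySem.Chars.strip c)

theorem fb_strip_space (cs : List Char) :
    PySem.Chars.strip (' ' :: cs) = PySem.Chars.strip cs := by
  simp [PySem.Chars.strip, PySem.Chars.lstrip, PySem.Chars.isspace]

theorem fb_join_space (x : List Char) (xs : List (List Char)) :
    PySem.Chars.join [' '] (x :: xs) = x ++ xs.flatMap (fun s => ' ' :: s) := by
  induction xs generalizing x with
  | nil => simp [PySem.Chars.join_singleton]
  | cons y ys ih => simp [PySem.Chars.join_cons_cons, ih y]

theorem fb_turnB_eq (l : List Char) (cont : List (List Char)) :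
    fbTurnB l cont =
      PySem.Chars.strip ((if fbIsHdr l then l else PySem.Chars.strip l) ++ fbExt cont) := by
  unfold fbTurnB fbExt
  rw [fb_join_space]
  simp [List.flatMap_map]

theorem fb_hdr_ne_nil {l : List Char} (h : fbIsHdr l = true) : l ≠ [] := by
  intro hnil; subst hnil; exact absurd h (by decide)

theorem fb_strip_group (l : List Char) (cont : List (List Char)) :
    PySem.Chars.strip ((if fbIsHdr l then l else ' ' :: PySem.Chars.strip l) ++ fbExt cont) =
      fbTurnB l cont := by
  rw [fb_turnB_eq]
  by_cases hl : fbIsHdr l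
  · rw [if_pos hl, if_pos hl]
  · rw [if_neg hl, if_neg hl, List.cons_append]
    exact fb_strip_space _

theorem fb_group_ne_nil (l : List Char) (cont : List (List Char)) :
    (if fbIsHdr l then l else ' ' :: PySem.Chars.strip l) ++ fbExt cont ≠ [] := by
  by_cases hl : fbIsHdr l
  · rw [if_pos hl]; simp [fb_hdr_ne_nil hl]
  · rw [if_neg hl]; simp

theorem fbLoopA_acc (ls : List (List Char)) (cur : List Char) (turns : List (List Char)) :
    fbLoopA ls cur turns = turns ++ fbLoopA ls cur [] := by
  induction ls generalizing cur turns with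
  | nil => simp only [fbLoopA]; split_ifs <;> simp
  | cons l ls ih =>
    simp only [fbLoopA]
    split_ifs with h h2
    · exact ih _ _
    · rw [ih l (turns ++ [PySem.Chars.strip cur]), ih l ([] ++ [PySem.Chars.strip cur])]
      simp
    · exact ih _ _

theorem fbLoopA_skip (cont : List (List Char)) (rest : List (List Char))
    (cur : List Char) (turns : List (List Char))
    (h : ∀ c ∈ cont, fbIsHdr c = false) :
    fbLoopA (cont ++ rest) cur turns = fbLoopA rest (cur ++ fbExt cont) turns := by
  induction cont generalizing cur with
  | nil => simp [fbExt]
  | cons c cs ih =>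
    have hc : fbIsHdr c = false := h c (by simp)
    simp only [List.cons_append, fbLoopA, hc, Bool.false_eq_true, if_false]
    rw [ih _ (fun x hx => h x (by simp [hx]))]
    simp [fbExt]

theorem fb_dropWhile_head_hdr :
    ∀ (ls : List (List Char)) (r : List Char) (rs : List (List Char)),
      ls.dropWhile (fun x => !fbIsHdr x) = r :: rs → fbIsHdr r = true := by
  intro ls
  induction ls with
  | nil => intro r rs h; simp at h
  | cons l ls ih =>
    intro r rs h
    by_cases hl : fbIsHdr l
    · simp [hl] at h
      simp [← h.1, hl]
    · simp [hl] at h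
      exact ih _ _ h

theorem fb_main : ∀ (n : Nat) (ls : List (List Char)), ls.length ≤ n →
    (fbLoopA ls [] []).map fbToDict = fbGroupsB ls := by
  intro n
  induction n with
  | zero =>
    intro ls h
    have : ls = [] := List.length_eq_zero_iff.mp (Nat.le_zero.mp h)
    subst this
    rw [fbGroupsB_nil]; simp [fbLoopA]
  | succ n ih =>
    intro ls hlen
    match ls with
    | [] => rw [fbGroupsB_nil]; simp [fbLoopA]
    | l :: ls' =>
      have hsplit : ls'.takeWhile (fun x => !fbIsHdr x) ++ ls'.dropWhile (fun x => !fbIsHdr x) = ls' :=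
        List.takeWhile_append_dropWhile
      have hcont : ∀ c ∈ ls'.takeWhile (fun x => !fbIsHdr x), fbIsHdr c = false := by
        intro c hc
        simpa using List.mem_takeWhile_imp hc
      have hA : fbLoopA (l :: ls') [] [] =
          fbLoopA (ls'.dropWhile (fun x => !fbIsHdr x))
            ((if fbIsHdr l then l else ' ' :: PySem.Chars.strip l) ++
              fbExt (ls'.takeWhile (fun x => !fbIsHdr x))) [] := by
        by_cases hl : fbIsHdr l
        · rw [show fbLoopA (l :: ls') [] [] = fbLoopA ls' l [] by simp [fbLoopA, hl]]
          conv_lhs => rw [← hsplit]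
          rw [fbLoopA_skip _ _ _ _ hcont, if_pos hl]
        · rw [show fbLoopA (l :: ls') [] [] = fbLoopA ls' (' ' :: PySem.Chars.strip l) [] by
            simp [fbLoopA, hl]]
          conv_lhs => rw [← hsplit]
          rw [fbLoopA_skip _ _ _ _ hcont, if_neg hl]
      have hne := fb_group_ne_nil l (ls'.takeWhile (fun x => !fbIsHdr x))
      cases hr : ls'.dropWhile (fun x => !fbIsHdr x) with
      | nil =>
        rw [hA, hr, fbGroupsB_cons, hr, fbGroupsB_nil]
        simp only [fbLoopA, if_neg hne, List.nil_append, List.map_cons, List.map_nil]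
        rw [fb_strip_group]
      | cons r rs =>
        have hrr : fbIsHdr r = true := fb_dropWhile_head_hdr ls' r rs hr
        have hrlen : (r :: rs).length ≤ n := by
          have h1 := ls'.length_dropWhile_le (fun x => !fbIsHdr x)
          rw [hr] at h1
          simp only [List.length_cons] at h1 hlen ⊢
          omega
        rw [hA, hr]
        rw [show fbLoopA (r :: rs)
              ((if fbIsHdr l then l else ' ' :: PySem.Chars.strip l) ++
                fbExt (ls'.takeWhile (fun x => !fbIsHdr x))) [] =
            fbLoopA rs r [PySem.Chars.strip
              ((if fbIsHdr l then l else ' ' :: PySem.Chars.strip l) ++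
                fbExt (ls'.takeWhile (fun x => !fbIsHdr x)))] by
          simp only [fbLoopA, hrr, if_pos, if_neg hne, List.nil_append]]
        rw [fbLoopA_acc, fb_strip_group]
        rw [show fbLoopA rs r [] = fbLoopA (r :: rs) [] [] by simp [fbLoopA, hrr]]
        rw [List.map_append, ih (r :: rs) hrlen]
        conv_rhs => rw [fbGroupsB_cons, hr]
        simp

-- ===== VERDICT (by name: the statement is the Claim_ definition above) =====
theorem format_back_dialogue_spec : Claim_equal_format_back_dialogue := by
  intro dialogue _
  unfold Spec_format_back_dialogue format_back_dialogue format_back_dialogue_alt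
  exact fb_main _ _ (Nat.le_refl _)
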